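-- pv_equiv track=rewrite | github.com/vidhyaMani/FinegrainedNER | src/evaluation/error_analysis.py | compute_fp_fn_by_entity
-- ===== SOURCE A (Python) =====
-- from collections import Counter, defaultdict
-- from typing import Any, Dict, List, Optional, Tuple
--
-- def compute_fp_fn_by_entity(
--     true_labels: List[List[str]],
--     pred_labels: List[List[str]],
-- ) -> Dict[str, Dict[str, int]]:
--     """Compute false positive and false negative counts by entity type.
--
--     Args:
--         true_labels: True IOB2 tag sequences.
--         pred_labels: Predicted IOB2 tag sequences.
--
--     Returns:
--         Dict mapping entity_type -> {fp: count, fn: count, tp: count}.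
--     """
--     entity_stats: Dict[str, Dict[str, int]] = defaultdict(lambda: {"fp": 0, "fn": 0, "tp": 0})
--
--     for true_seq, pred_seq in zip(true_labels, pred_labels):
--         for true_tag, pred_tag in zip(true_seq, pred_seq):
--             true_type = true_tag[2:] if true_tag != "O" else None
--             pred_type = pred_tag[2:] if pred_tag != "O" else None
--
--             if true_type and pred_type:
--                 if true_type == pred_type:
--                     entity_stats[true_type]["tp"] += 1
--                 else:
--                     entity_stats[true_type]["fn"] += 1
--                     entity_stats[pred_type]["fp"] += 1
--             elif true_type and not pred_type:
--                 entity_stats[true_type]["fn"] += 1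
--             elif pred_type and not true_type:
--                 entity_stats[pred_type]["fp"] += 1
--
--     return dict(entity_stats)
-- ===== SOURCE B (Python) =====
-- from collections import Counter
--
--
-- def _token_events(true_tag, pred_tag):
--     """Classify one token position into a (possibly empty) list of (entity, kind) events."""
--     tt = true_tag[2:] if true_tag != "O" else None
--     pt = pred_tag[2:] if pred_tag != "O" else None
--     if tt and pt:
--         return [(tt, "tp")] if tt == pt else [(tt, "fn"), (pt, "fp")]
--     if tt:
--         return [(tt, "fn")]
--     if pt:
--         return [(pt, "fp")]
--     return []
--
--
-- def compute_fp_fn_by_entity(true_labels, pred_labels):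
--     """Event-stream version: flatten everything into one (entity, kind) event list,
--     take entity first-occurrence order, count events once, and build the result
--     by comprehension (no incremental per-token dict updates)."""
--     events = [ev
--               for ts, ps in zip(true_labels, pred_labels)
--               for t, p in zip(ts, ps)
--               for ev in _token_events(t, p)]
--     order = dict.fromkeys(e for e, _ in events)
--     c = Counter(events)
--     return {e: {"fp": c[(e, "fp")], "fn": c[(e, "fn")], "tp": c[(e, "tp")]}
--             for e in order}
-- ===== Notes on version B (the rewrite author's own statement) =====
-- stated objective: alternative
-- what changed: A updates a per-entity stats dict token by token inside nested loops; B flattens the input into one (entity, kind) event list, takes first-occurrence entity order with dict.fromkeys, counts the events once with a single Counter, and builds the whole result in one dict comprehension - no incremental dict updates at all.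
import Mathlib
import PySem

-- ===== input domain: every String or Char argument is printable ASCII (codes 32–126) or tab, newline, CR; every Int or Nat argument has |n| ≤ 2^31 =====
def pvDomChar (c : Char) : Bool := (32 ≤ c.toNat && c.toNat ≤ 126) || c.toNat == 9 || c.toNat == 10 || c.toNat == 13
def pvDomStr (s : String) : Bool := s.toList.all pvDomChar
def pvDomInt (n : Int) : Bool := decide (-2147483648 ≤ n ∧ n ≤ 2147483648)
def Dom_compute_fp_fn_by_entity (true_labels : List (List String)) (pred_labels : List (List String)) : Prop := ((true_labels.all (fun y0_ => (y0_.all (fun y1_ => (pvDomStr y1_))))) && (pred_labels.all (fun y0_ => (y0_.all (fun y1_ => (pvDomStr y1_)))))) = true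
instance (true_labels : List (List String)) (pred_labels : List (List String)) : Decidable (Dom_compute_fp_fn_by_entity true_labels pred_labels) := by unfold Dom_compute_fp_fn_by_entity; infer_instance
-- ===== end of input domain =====

-- B replaces A's token-by-token nested-dict updates by an event stream: flatten to a list of
-- (entity, kind) events, dedupe entities for order, count events once, build the result by
-- comprehension (objective: alternative).

-- ===== PORT A =====
-- true_tag[2:] if true_tag != "O" else None
def pvATagType (tag : String) : Option String :=
  if tag ≠ "O" then some (PySem.Str.slice tag (some 2) none) else none

-- Python truthiness of an Optional[str]: None and "" are falsy
def pvATruthy (o : Option String) : Bool :=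
  match o with
  | none => false
  | some s => decide (s ≠ "")

-- the defaultdict's default: {"fp": 0, "fn": 0, "tp": 0}
def pvAInit : PySem.Dict String Int := PySem.Dict.ofList [("fp", 0), ("fn", 0), ("tp", 0)]

-- entity_stats[e][k] += 1 (defaultdict inserts the default on first access, then the inner value is set)
def pvABump (d : PySem.Dict String (PySem.Dict String Int)) (e k : String) :
    PySem.Dict String (PySem.Dict String Int) :=
  let cur := d.getD e pvAInit
  d.insert e (cur.insert k (cur.getD k 0 + 1))

def compute_fp_fn_by_entity (true_labels : List (List String)) (pred_labels : List (List String)) :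
    List (String × List (String × Int)) :=
  let entity_stats :=
    (true_labels.zip pred_labels).foldl (fun d sq =>
      (sq.1.zip sq.2).foldl (fun d tg =>
        let true_type := pvATagType tg.1
        let pred_type := pvATagType tg.2
        if pvATruthy true_type && pvATruthy pred_type then
          if true_type = pred_type then pvABump d (true_type.getD "") "tp"
          else pvABump (pvABump d (true_type.getD "") "fn") (pred_type.getD "") "fp"
        else if pvATruthy true_type && !pvATruthy pred_type then
          pvABump d (true_type.getD "") "fn"
        else if pvATruthy pred_type && !pvATruthy true_type then
          pvABump d (pred_type.getD "") "fp"
        else d) d) PySem.Dict.empty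
  entity_stats.items.map (fun p => (p.1, p.2.items))

-- ===== PORT B =====
-- _token_events(true_tag, pred_tag): the (entity, kind) events one token position generates;
-- 'tt and pt' etc. use Python truthiness, where None and "" are falsy
def pvTokenEvents (true_tag pred_tag : String) : List (String × String) :=
  let tt : Option String := if true_tag ≠ "O" then some (PySem.Str.slice true_tag (some 2) none) else none
  let pt : Option String := if pred_tag ≠ "O" then some (PySem.Str.slice pred_tag (some 2) none) else none
  let truthy : Option String → Bool := fun o => o.getD "" ≠ "" && o.isSome
  if truthy tt && truthy pt then
    if tt = pt then [(tt.getD "", "tp")] else [(tt.getD "", "fn"), (pt.getD "", "fp")]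
  else if truthy tt then [(tt.getD "", "fn")]
  else if truthy pt then [(pt.getD "", "fp")]
  else []

-- the flattening comprehension building 'events'
def pvBEvents (true_labels pred_labels : List (List String)) : List (String × String) :=
  (true_labels.zip pred_labels).flatMap (fun sq =>
    (sq.1.zip sq.2).flatMap (fun tg => pvTokenEvents tg.1 tg.2))

def compute_fp_fn_by_entity_alt (true_labels : List (List String)) (pred_labels : List (List String)) :
    List (String × List (String × Int)) :=
  let events := pvBEvents true_labels pred_labels
  -- order = dict.fromkeys(e for e, _ in events): first-occurrence order of entities
  let order := PySem.Set.ofList (events.map Prod.fst)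
  -- c = Counter(events)
  let c := PySem.Dict.counter events
  order.map (fun e =>
    (e, [("fp", c.getD (e, "fp") 0), ("fn", c.getD (e, "fn") 0), ("tp", c.getD (e, "tp") 0)]))

-- ===== PRECONDITION & SPEC =====
def Spec_compute_fp_fn_by_entity (true_labels : List (List String)) (pred_labels : List (List String)) (out : List (String × List (String × Int))) : Prop := out = compute_fp_fn_by_entity_alt true_labels pred_labels
instance (true_labels : List (List String)) (pred_labels : List (List String)) (out : List (String × List (String × Int))) : Decidable (Spec_compute_fp_fn_by_entity true_labels pred_labels out) := by unfold Spec_compute_fp_fn_by_entity; infer_instance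

-- ===== CLAIM (what is proved, stated in full; the proofs are below) =====
def Claim_equal_compute_fp_fn_by_entity : Prop := ∀ (true_labels : List (List String)) (pred_labels : List (List String)), Dom_compute_fp_fn_by_entity true_labels pred_labels → Spec_compute_fp_fn_by_entity true_labels pred_labels (compute_fp_fn_by_entity true_labels pred_labels)

-- ===== LEMMAS AND PROOFS =====

-- the weighted-bump A's loop body reduces to
def pvBump0 (d : PySem.Dict String (PySem.Dict String Int)) (e k : String) (n : Int) :
    PySem.Dict String (PySem.Dict String Int) :=
  d.insert e ((d.getD e pvAInit).insert k ((d.getD e pvAInit).getD k 0 + n))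

def pvReplay (W : List ((String × String) × Int))
    (d : PySem.Dict String (PySem.Dict String Int)) : PySem.Dict String (PySem.Dict String Int) :=
  W.foldl (fun d q => pvBump0 d q.1.1 q.1.2 q.2) d

def pvWsum (W : List ((String × String) × Int)) (p : String × String) : Int :=
  ((W.filter (fun q => q.1 = p)).map (fun q => q.2)).sum

def pvInnerW (W : List ((String × String) × Int)) (e : String) : PySem.Dict String Int :=
  PySem.Dict.mk [("fp", pvWsum W (e, "fp")), ("fn", pvWsum W (e, "fn")), ("tp", pvWsum W (e, "tp"))]

def pvKeysOf (W : List ((String × String) × Int)) : List String :=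
  PySem.Set.ofList (W.map (fun q => q.1.1))

def pvCanon (W : List ((String × String) × Int)) : PySem.Dict String (PySem.Dict String Int) :=
  PySem.Dict.mk ((pvKeysOf W).map (fun e => (e, pvInnerW W e)))

theorem pvABump_eq (d : PySem.Dict String (PySem.Dict String Int)) (e k : String) :
    pvABump d e k = pvBump0 d e k 1 := by
  simp [pvABump, pvBump0]

-- generic: foldl over a flatMap is the nested foldl
theorem pv_foldl_flatMap {α β γ : Type} (f : β → α → β) (g : γ → List α) (l : List γ) (b : β) :
    (l.flatMap g).foldl f b = l.foldl (fun b x => (g x).foldl f b) b := by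
  induction l generalizing b with
  | nil => rfl
  | cons x t ih => simp [List.flatMap_cons, List.foldl_append, ih]

theorem pvA_body (d : PySem.Dict String (PySem.Dict String Int)) (tg : String × String) :
    (let true_type := pvATagType tg.1
     let pred_type := pvATagType tg.2
     if pvATruthy true_type && pvATruthy pred_type then
       if true_type = pred_type then pvABump d (true_type.getD "") "tp"
       else pvABump (pvABump d (true_type.getD "") "fn") (pred_type.getD "") "fp"
     else if pvATruthy true_type && !pvATruthy pred_type then
       pvABump d (true_type.getD "") "fn"
     else if pvATruthy pred_type && !pvATruthy true_type then
       pvABump d (pred_type.getD "") "fp"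
     else d)
    = pvReplay ((pvTokenEvents tg.1 tg.2).map (fun ek => (ek, 1))) d := by
  have hT : ∀ (tag : String),
      pvATruthy (pvATagType tag)
        = ((pvATagType tag).getD "" ≠ "" && (pvATagType tag).isSome) := by
    intro tag
    unfold pvATruthy pvATagType
    split_ifs <;> simp
  simp only [pvTokenEvents, pvReplay]
  rw [show (if tg.1 ≠ "O" then some (PySem.Str.slice tg.1 (some 2) none) else none) = pvATagType tg.1 from rfl,
      show (if tg.2 ≠ "O" then some (PySem.Str.slice tg.2 (some 2) none) else none) = pvATagType tg.2 from rfl]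
  simp only [← hT]
  split_ifs <;> simp_all [pvABump_eq]

theorem pvA_stats (tl pl : List (List String)) :
    ((tl.zip pl).foldl (fun d sq =>
      (sq.1.zip sq.2).foldl (fun d tg =>
        let true_type := pvATagType tg.1
        let pred_type := pvATagType tg.2
        if pvATruthy true_type && pvATruthy pred_type then
          if true_type = pred_type then pvABump d (true_type.getD "") "tp"
          else pvABump (pvABump d (true_type.getD "") "fn") (pred_type.getD "") "fp"
        else if pvATruthy true_type && !pvATruthy pred_type then
          pvABump d (true_type.getD "") "fn"
        else if pvATruthy pred_type && !pvATruthy true_type then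
          pvABump d (pred_type.getD "") "fp"
        else d) d) PySem.Dict.empty)
    = pvReplay ((pvBEvents tl pl).map (fun ek => (ek, 1))) PySem.Dict.empty := by
  simp only [pvA_body]
  have h1 : ∀ (toks : List (String × String)) (d : PySem.Dict String (PySem.Dict String Int)),
      toks.foldl (fun d tg =>
        pvReplay ((pvTokenEvents tg.1 tg.2).map (fun ek => (ek, (1 : Int)))) d) d
      = (toks.flatMap (fun tg =>
          (pvTokenEvents tg.1 tg.2).map (fun ek => (ek, (1 : Int))))).foldl
            (fun d q => pvBump0 d q.1.1 q.1.2 q.2) d := by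
    intro toks d
    rw [pv_foldl_flatMap]
    rfl
  simp only [h1]
  rw [← pv_foldl_flatMap]
  show _ = List.foldl _ _ _
  congr 1
  unfold pvBEvents
  rw [List.map_flatMap]
  congr 1
  funext sq
  rw [List.map_flatMap]

-- ---- weighted-sum lemmas ----
theorem pvWsum_append (V W : List ((String × String) × Int)) (p : String × String) :
    pvWsum (V ++ W) p = pvWsum V p + pvWsum W p := by
  simp [pvWsum, List.filter_append]

theorem pvWsum_zero (W : List ((String × String) × Int)) (e : String) (k : String)
    (he : e ∉ W.map (fun q => q.1.1)) : pvWsum W (e, k) = 0 := by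
  have h : W.filter (fun q => q.1 = (e, k)) = [] := by
    rw [List.filter_eq_nil_iff]
    intro q hq hcontra
    exact he (List.mem_map.mpr ⟨q, hq, by simp_all⟩)
  simp [pvWsum, h]

theorem pvInner_irrel (W : List ((String × String) × Int)) (e k : String) (n : Int) (e' : String)
    (hne : e' ≠ e) : pvInnerW (W ++ [((e, k), n)]) e' = pvInnerW W e' := by
  have h : ∀ k', pvWsum [((e, k), n)] (e', k') = 0 := by
    intro k'
    have hne' : e ≠ e' := Ne.symm hne
    simp [pvWsum, hne']
  simp [pvInnerW, pvWsum_append, h]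

-- ---- pvCanon lookups and the single step ----
theorem pvCanon_keys (W : List ((String × String) × Int)) :
    (pvCanon W).keys = pvKeysOf W := by
  simp [pvCanon, PySem.Dict.keys_mk, List.map_map, Function.comp_def]

theorem pvCanon_getD (W : List ((String × String) × Int)) (e : String) :
    (pvCanon W).getD e pvAInit = pvInnerW W e := by
  by_cases he : e ∈ pvKeysOf W
  · refine PySem.Dict.getD_of_mem_items _ ?_ ?_ _
    · exact List.mem_map.mpr ⟨e, he, rfl⟩
    · rw [pvCanon_keys]; exact PySem.Set.nodup_ofList _
  · have hc : (pvCanon W).contains e = false := by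
      rw [PySem.Dict.contains_eq_decide_mem_keys, pvCanon_keys]
      simp [he]
    rw [PySem.Dict.getD_of_not_contains _ _ hc]
    have h0 : ∀ k, pvWsum W (e, k) = 0 := fun k =>
      pvWsum_zero W e k (fun hm => he ((PySem.Set.mem_ofList _ _).mpr hm))
    simp [pvInnerW, pvAInit, h0]
    rfl

theorem pvInner_step (W : List ((String × String) × Int)) (e k : String) (n : Int)
    (hk : k = "fp" ∨ k = "fn" ∨ k = "tp") :
    (pvInnerW W e).insert k ((pvInnerW W e).getD k 0 + n) = pvInnerW (W ++ [((e, k), n)]) e := by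
  have hsing : ∀ k', pvWsum [((e, k), n)] (e, k') = if k' = k then n else 0 := by
    intro k'
    by_cases h : k' = k
    · simp [pvWsum, h]
    · have h' : k ≠ k' := Ne.symm h
      simp [pvWsum, h, h']
  rcases hk with h | h | h <;> subst h <;>
    apply PySem.Dict.ext <;>
    simp [pvInnerW, PySem.Dict.insert, PySem.Dict.getD, PySem.Dict.get?] <;>
    refine ⟨?_, ?_, ?_⟩ <;> rw [pvWsum_append, hsing] <;> simp

theorem pvCanon_step (W : List ((String × String) × Int)) (e k : String) (n : Int)
    (hk : k = "fp" ∨ k = "fn" ∨ k = "tp") :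
    pvBump0 (pvCanon W) e k n = pvCanon (W ++ [((e, k), n)]) := by
  unfold pvBump0
  rw [pvCanon_getD, pvInner_step W e k n hk]
  have hkeysApp : (W ++ [((e, k), n)]).map (fun q => q.1.1) = W.map (fun q => q.1.1) ++ [e] := by
    simp
  apply PySem.Dict.ext
  by_cases he : e ∈ pvKeysOf W
  · have hc : (pvCanon W).contains e = true := by
      rw [PySem.Dict.contains_eq_decide_mem_keys, pvCanon_keys]; simp [he]
    rw [PySem.Dict.items_insert_of_contains _ _ hc]
    have hmem : e ∈ W.map (fun q => q.1.1) := (PySem.Set.mem_ofList _ _).mp he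
    have hkeys : pvKeysOf (W ++ [((e, k), n)]) = pvKeysOf W := by
      unfold pvKeysOf
      rw [hkeysApp, PySem.Set.ofList_append_singleton,
        PySem.Set.add_of_mem ((PySem.Set.mem_ofList _ _).mpr hmem)]
    show _ = (pvCanon (W ++ [((e, k), n)])).items
    simp only [pvCanon, hkeys]
    show List.map _ (List.map _ (pvKeysOf W)) = _
    rw [List.map_map]
    apply List.map_congr_left
    intro e' _
    by_cases h : e' = e
    · subst h; simp
    · simp [Function.comp, h, pvInner_irrel W e k n e' h]
  · have hc : (pvCanon W).contains e = false := by
      rw [PySem.Dict.contains_eq_decide_mem_keys, pvCanon_keys]; simp [he]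
    rw [PySem.Dict.items_insert_of_not_contains _ _ hc]
    have hkeys : pvKeysOf (W ++ [((e, k), n)]) = pvKeysOf W ++ [e] := by
      unfold pvKeysOf
      rw [hkeysApp, PySem.Set.ofList_append_singleton, PySem.Set.add_of_not_mem]
      intro hm
      exact he hm
    show _ = (pvCanon (W ++ [((e, k), n)])).items
    simp only [pvCanon, hkeys, List.map_append]
    have hmapc : (pvKeysOf W).map (fun e' => (e', pvInnerW (W ++ [((e, k), n)]) e'))
        = (pvKeysOf W).map (fun e' => (e', pvInnerW W e')) :=
      List.map_congr_left (fun e' he' => by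
        have h : e' ≠ e := fun hh => he (hh ▸ he')
        simp [pvInner_irrel W e k n e' h])
    rw [hmapc]
    rfl

theorem pvReplay_canon (W : List ((String × String) × Int))
    (hk : ∀ q ∈ W, q.1.2 = "fp" ∨ q.1.2 = "fn" ∨ q.1.2 = "tp") :
    pvReplay W PySem.Dict.empty = pvCanon W := by
  induction W using List.reverseRecOn with
  | nil => rfl
  | append_singleton V q ih =>
    obtain ⟨⟨e, k⟩, n⟩ := q
    have hV : ∀ q ∈ V, q.1.2 = "fp" ∨ q.1.2 = "fn" ∨ q.1.2 = "tp" := fun q hq =>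
      hk q (List.mem_append_left _ hq)
    have hq : k = "fp" ∨ k = "fn" ∨ k = "tp" := hk ((e, k), n) (by simp)
    unfold pvReplay
    rw [List.foldl_append]
    show pvBump0 (pvReplay V PySem.Dict.empty) e k n = _
    rw [ih hV, pvCanon_step V e k n hq]

-- weight-1 sums are counts
theorem pvWsum_ones (E : List (String × String)) (p : String × String) :
    pvWsum (E.map (fun ek => (ek, (1 : Int)))) p = (E.count p : Int) := by
  induction E with
  | nil => simp [pvWsum]
  | cons e t ih =>
    by_cases h : e = p
    · subst h
      have hstep : pvWsum ((e :: t).map (fun ek => (ek, (1 : Int)))) e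
          = 1 + pvWsum (t.map (fun ek => (ek, (1 : Int)))) e := by
        simp [pvWsum]
      rw [hstep, ih, List.count_cons_self]
      push_cast
      ring
    · have hstep : pvWsum ((e :: t).map (fun ek => (ek, (1 : Int)))) p
          = pvWsum (t.map (fun ek => (ek, (1 : Int)))) p := by
        simp [pvWsum, h]
      rw [hstep, ih]
      simp [h]

-- every event kind produced by pvTokenEvents is one of the three fixed keys
theorem pvTokenEvents_all (t p : String) :
    (pvTokenEvents t p).all (fun ek => ek.2 == "fp" || ek.2 == "fn" || ek.2 == "tp") = true := by
  unfold pvTokenEvents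
  split_ifs <;> simp <;> intro a b <;> split_ifs <;> simp_all <;>
    rintro (⟨-, rfl⟩ | ⟨-, rfl⟩) <;> simp

theorem pvTokenEvents_kind (t p : String) :
    ∀ ek ∈ pvTokenEvents t p, ek.2 = "fp" ∨ ek.2 = "fn" ∨ ek.2 = "tp" := by
  intro ek h
  have := List.all_eq_true.mp (pvTokenEvents_all t p) ek h
  simp at this; tauto

-- ===== VERDICT (by name: the statement is the Claim_ definition above) =====
theorem compute_fp_fn_by_entity_spec : Claim_equal_compute_fp_fn_by_entity := by
  intro tl pl _
  unfold Spec_compute_fp_fn_by_entity compute_fp_fn_by_entity compute_fp_fn_by_entity_alt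
  rw [pvA_stats tl pl]
  set E := pvBEvents tl pl with hE
  have hk : ∀ q ∈ E.map (fun ek => (ek, (1 : Int))),
      q.1.2 = "fp" ∨ q.1.2 = "fn" ∨ q.1.2 = "tp" := by
    intro q hq
    obtain ⟨ek, hek, rfl⟩ := List.mem_map.mp hq
    have : ∃ sq ∈ tl.zip pl, ek ∈ (sq.1.zip sq.2).flatMap (fun tg => pvTokenEvents tg.1 tg.2) := by
      have := hek
      rw [hE] at this
      exact List.mem_flatMap.mp this
    obtain ⟨sq, _, hm⟩ := this
    obtain ⟨tg, _, hm2⟩ := List.mem_flatMap.mp hm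
    exact pvTokenEvents_kind tg.1 tg.2 ek hm2
  rw [pvReplay_canon _ hk]
  have hkeys : pvKeysOf (E.map (fun ek => (ek, (1 : Int)))) = PySem.Set.ofList (E.map Prod.fst) := by
    unfold pvKeysOf
    rw [List.map_map]
    rfl
  show (pvCanon (E.map (fun ek => (ek, (1 : Int))))).items.map (fun p => (p.1, p.2.items)) = _
  simp only [pvCanon, hkeys]
  show List.map _ (List.map _ _) = _
  rw [List.map_map]
  apply List.map_congr_left
  intro e _
  simp only [Function.comp]
  show (e, (pvInnerW (E.map (fun ek => (ek, (1 : Int)))) e).items) = _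
  simp only [pvInnerW, pvWsum_ones, PySem.Dict.getD_counter]
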